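-- pv_equiv track=rewrite | github.com/kiscsonti/ContinueTheList | evaluation/evaluate_script.py | query_overlap
-- ===== SOURCE A (Python) =====
-- def query_overlap(all_triples, smaller):
--     smaller_bools = list()
--
--     for triple in smaller:
--         less_go = False
--         for rem in all_triples:
--             cool = True
--             for i in range(len(triple)):
--                 rem = [elem.replace("<", "").replace(">", "") for elem in rem]
--                 if triple[i][0] == "?" and rem[i][0] == "?":
--                     continue
--                 if triple[i] != rem[i]:
--                     cool = False
--                     break
--             if cool:
--                 less_go = True
--                 break
--         smaller_bools.append(less_go)
--
--     return all(smaller_bools)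
-- ===== SOURCE B (Python) =====
-- def query_overlap(all_triples, smaller):
--     def norm(s):
--         return "?" if s.startswith("?") else s
--
--     lengths = {len(t) for t in smaller}
--     prefixes = set()
--     for rem in all_triples:
--         cleaned = [norm(e.replace("<", "").replace(">", "")) for e in rem]
--         for L in lengths:
--             if L <= len(cleaned):
--                 prefixes.add(tuple(cleaned[:L]))
--     return all(tuple(norm(e) for e in t) in prefixes for t in smaller)
-- ===== Notes on version B (the rewrite author's own statement) =====
-- stated objective: faster
-- what changed: Replaces the O(N*M*L) nested scan (each smaller triple re-cleaned against every big triple) with one precomputation pass: each big triple is cleaned and wildcard-normalized once and its prefixes of the occurring smaller lengths are stored in a set, so each smaller triple is a single O(1) set lookup.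
import Mathlib
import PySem

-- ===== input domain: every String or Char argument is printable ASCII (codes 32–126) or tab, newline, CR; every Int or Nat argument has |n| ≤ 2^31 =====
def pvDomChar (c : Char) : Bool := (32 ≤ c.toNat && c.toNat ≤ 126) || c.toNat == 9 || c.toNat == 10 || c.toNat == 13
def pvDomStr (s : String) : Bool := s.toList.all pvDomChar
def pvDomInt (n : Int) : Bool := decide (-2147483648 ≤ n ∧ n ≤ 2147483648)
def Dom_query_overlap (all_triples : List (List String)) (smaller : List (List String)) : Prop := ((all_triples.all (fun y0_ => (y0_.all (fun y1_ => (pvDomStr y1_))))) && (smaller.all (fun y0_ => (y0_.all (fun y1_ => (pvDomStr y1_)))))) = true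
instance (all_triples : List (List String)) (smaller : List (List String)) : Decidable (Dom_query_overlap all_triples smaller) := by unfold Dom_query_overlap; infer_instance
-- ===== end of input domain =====

-- B precomputes each big triple's cleaned, wildcard-normalized prefixes once into a set,
-- turning A's nested rescans into one set-membership test per smaller triple (objective: faster).

-- ===== PORT A =====
-- shared helper: elem.replace("<", "").replace(">", "")
def pvClean (s : String) : String := PySem.Str.replace (PySem.Str.replace s "<" "") ">" ""

-- s[0] == "?"  (none = IndexError on the empty string, excluded by Pre_; false there)
def pvStarts (s : String) : Bool := PySem.Str.pyGet? s 0 == some '?'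

-- A's inner loop: for i in range(len(triple)), carrying the re-cleaned rem as state
def pvInnerGo (t : List String) (rem : List String) (i : Nat) : Bool :=
  if _h : i < t.length then
    let rem' := rem.map pvClean
    let ti := t.getD i ""          -- in range here
    let ri := rem'.getD i ""       -- i ≥ len(rem) = IndexError in Python, excluded by Pre_
    if pvStarts ti && pvStarts ri then pvInnerGo t rem' (i + 1)
    else if ti ≠ ri then false
    else pvInnerGo t rem' (i + 1)
  else true
termination_by t.length - i

-- A's middle loop with break: first rem that matches
def pvAnyRem (all_triples : List (List String)) (t : List String) : Bool :=
  match all_triples with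
  | [] => false
  | r :: rest => if pvInnerGo t r 0 then true else pvAnyRem rest t

def query_overlap (all_triples : List (List String)) (smaller : List (List String)) : Bool :=
  (smaller.foldl (fun bs t => bs ++ [pvAnyRem all_triples t]) []).all id

-- ===== PORT B =====
-- "?" if s.startswith("?") else s
def pvNorm (s : String) : String := if PySem.Str.startswith s "?" then "?" else s

-- [norm(e.replace("<", "").replace(">", "")) for e in rem]
def pvCleaned (rem : List String) : List String := rem.map (fun e => pvNorm (pvClean e))

-- the prefixes-set accumulation loop of B
def pvPrefixes (all_triples : List (List String)) (lengths : PySem.Set Nat) : PySem.Set (List String) :=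
  all_triples.foldl
    (fun px rem =>
      let cleaned := pvCleaned rem
      lengths.foldl
        (fun px L => if L ≤ cleaned.length then PySem.Set.add px (cleaned.take L) else px)
        px)
    PySem.Set.empty

def query_overlap_alt (all_triples : List (List String)) (smaller : List (List String)) : Bool :=
  let lengths : PySem.Set Nat := PySem.Set.ofList (smaller.map List.length)
  let prefixes : PySem.Set (List String) := pvPrefixes all_triples lengths
  smaller.all (fun t => PySem.Set.contains prefixes (t.map pvNorm))

-- ===== PRECONDITION & SPEC =====
-- a (triple, rem) pair is safe when, at every position the scan can reach (all earlier
-- normalized entries agree), the indexing A performs there is in range: the triple entry is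
-- nonempty, the position exists in rem, and a cleaned-empty rem entry is not probed under "?"
abbrev pvSafe (t r : List String) : Prop :=
  ∀ i < t.length,
    (∀ j < i, pvNorm (t.getD j "") = pvNorm ((r.map pvClean).getD j "")) →
    (t.getD i "" ≠ "" ∧ i < r.length ∧
      (PySem.Str.startswith (t.getD i "") "?" = true → pvClean (r.getD i "") ≠ ""))

-- "rem matches triple": the wildcard-normalized triple equals the corresponding prefix of
-- the cleaned, normalized rem (this is what A's full inner agreement amounts to)
abbrev pvPrefixEq (t r : List String) : Prop :=
  t.map pvNorm = (pvCleaned r).take t.length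

-- Pre_ excludes exactly the inputs where Python A raises IndexError: for some smaller triple,
-- the scan in order over all_triples reaches an unsafe pair before any earlier rem matched
-- (earlier rems all safe and non-matching); everywhere A returns a value, Pre_ holds.
def Pre_query_overlap (all_triples : List (List String)) (smaller : List (List String)) : Prop :=
  ∀ t ∈ smaller, ∀ k, k < all_triples.length →
    (∀ j, j < k → pvSafe t (all_triples.getD j []) ∧ ¬ pvPrefixEq t (all_triples.getD j [])) →
    pvSafe t (all_triples.getD k [])
instance (all_triples : List (List String)) (smaller : List (List String)) : Decidable (Pre_query_overlap all_triples smaller) := by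
  unfold Pre_query_overlap
  have dS : ∀ (t r : List String), Decidable (pvSafe t r) := fun t r => by
    unfold pvSafe; infer_instance
  have dP : ∀ (t r : List String), Decidable (pvPrefixEq t r) := fun t r => by
    unfold pvPrefixEq; infer_instance
  have dChain : ∀ (t : List String) (k : Nat),
      Decidable (∀ j, j < k → pvSafe t (all_triples.getD j []) ∧ ¬ pvPrefixEq t (all_triples.getD j [])) :=
    fun t k => @Nat.decidableBallLT k _
      (fun j _ => @instDecidableAnd _ _ (dS t _) (@instDecidableNot _ (dP t _)))
  have dT : ∀ (t : List String),
      Decidable (∀ k, k < all_triples.length →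
        (∀ j, j < k → pvSafe t (all_triples.getD j []) ∧ ¬ pvPrefixEq t (all_triples.getD j [])) →
        pvSafe t (all_triples.getD k [])) :=
    fun t => @Nat.decidableBallLT all_triples.length _
      (fun k _ => by haveI := dChain t k; haveI := dS t (all_triples.getD k []); infer_instance)
  exact @List.decidableBAll _ _ dT smaller

def pvWitness_query_overlap : List (List String) × List (List String) :=
  ([["a", "b"], ["?x", "c"]], [["a"], ["?z", "c"]])

def Spec_query_overlap (all_triples : List (List String)) (smaller : List (List String)) (out : Bool) : Prop := out = query_overlap_alt all_triples smaller
instance (all_triples : List (List String)) (smaller : List (List String)) (out : Bool) : Decidable (Spec_query_overlap all_triples smaller out) := by unfold Spec_query_overlap; infer_instance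

-- ===== CLAIM (what is proved, stated in full; the proofs are below) =====
def Claim_equal_query_overlap : Prop := ∀ (all_triples : List (List String)) (smaller : List (List String)), Dom_query_overlap all_triples smaller → Pre_query_overlap all_triples smaller → Spec_query_overlap all_triples smaller (query_overlap all_triples smaller)

-- ===== LEMMAS AND PROOFS =====

-- replace(s, ch, "") removes every occurrence of the single character ch
theorem pv_go_filter (ch : Char) (l : List Char) :
    ∀ (fuel : Nat) (acc : List Char), l.length ≤ fuel →
      PySem.Chars.replace.go [ch] [] fuel l acc
        = acc.reverse ++ l.filter (fun c => !(c == ch)) := by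
  induction l with
  | nil =>
      intro fuel acc _
      cases fuel <;> simp [PySem.Chars.replace.go]
  | cons c t ih =>
      intro fuel acc hle
      cases fuel with
      | zero => simp at hle
      | succ f =>
        by_cases hc : c = ch
        · subst hc
          have hpre : List.isPrefixOf [c] (c :: t) = true := by
            simp [List.isPrefixOf]
          simp only [PySem.Chars.replace.go, hpre, if_pos, List.length_cons, List.length_nil,
            List.drop_succ_cons, List.drop_zero, List.reverse_nil, List.nil_append]
          rw [ih f acc (by simpa using hle)]
          simp
        · have hpre : List.isPrefixOf [ch] (c :: t) = false := by
            simp [List.isPrefixOf, Ne.symm hc]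
          simp only [PySem.Chars.replace.go, hpre, Bool.false_eq_true, if_false]
          rw [ih f (c :: acc) (by simpa using Nat.le_of_succ_le_succ hle)]
          simp [hc]

theorem pv_replace_single (ch : Char) (l : List Char) :
    PySem.Chars.replace l [ch] [] = l.filter (fun c => !(c == ch)) := by
  rw [PySem.Chars.replace, if_neg (by simp)]
  simpa using pv_go_filter ch l l.length [] le_rfl

theorem pvClean_toList (s : String) :
    (pvClean s).toList = s.toList.filter (fun c => !(c == '>') && !(c == '<')) := by
  unfold pvClean
  simp only [PySem.Str.toList_replace]
  rw [show ("<" : String).toList = ['<'] from rfl, show (">" : String).toList = ['>'] from rfl,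
      show ("" : String).toList = [] from rfl]
  rw [pv_replace_single, pv_replace_single, List.filter_filter]

theorem pvClean_idem (s : String) : pvClean (pvClean s) = pvClean s := by
  apply String.toList_injective
  rw [pvClean_toList, pvClean_toList, List.filter_filter]
  congr 1
  funext c
  cases hc : (c == '<') <;> cases hd : (c == '>') <;> simp

theorem pv_pyGet0 {α : Type} (l : List α) : PySem.List.pyGet? l 0 = l.head? := by
  cases l <;> simp [PySem.List.pyGet?, PySem.List.pyIdx?]

theorem pvStarts_eq (s : String) : pvStarts s = PySem.Str.startswith s "?" := by
  unfold pvStarts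
  rw [PySem.Str.pyGet?_eq, PySem.Str.startswith_eq]
  show (PySem.List.pyGet? s.toList 0 == some '?') = PySem.Chars.startswith s.toList ['?']
  rw [pv_pyGet0]
  cases s.toList with
  | nil => rfl
  | cons c t => simp [PySem.Chars.startswith, List.isPrefixOf, eq_comm]

-- "?" starts with "?"
theorem pv_starts_qmark : PySem.Str.startswith "?" "?" = true := by decide

-- one position matches in A's sense iff the normalizations agree
theorem pvNorm_eq_iff (a b : String) :
    pvNorm a = pvNorm b ↔
      ((PySem.Str.startswith a "?" && PySem.Str.startswith b "?") = true ∨ a = b) := by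
  unfold pvNorm
  by_cases ha : PySem.Str.startswith a "?" = true <;>
  by_cases hb : PySem.Str.startswith b "?" = true
  · rw [if_pos ha, if_pos hb, ha, hb]
    simp only [Bool.true_and, true_or]
  · rw [Bool.not_eq_true] at hb
    rw [if_pos ha, if_neg (by rw [hb]; exact Bool.false_ne_true), ha, hb]
    simp only [Bool.true_and, Bool.false_eq_true, false_or]
    constructor
    · intro h
      subst h
      rw [pv_starts_qmark] at hb
      exact absurd hb (by decide)
    · intro h
      subst h
      exact absurd ha (by rw [hb]; exact Bool.false_ne_true)
  · rw [Bool.not_eq_true] at ha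
    rw [if_neg (by rw [ha]; exact Bool.false_ne_true), if_pos hb, ha, hb]
    simp only [Bool.false_and, Bool.false_eq_true, false_or]
    constructor
    · intro h
      subst h
      rw [pv_starts_qmark] at ha
      exact absurd ha (by decide)
    · intro h
      subst h
      exact absurd hb (by rw [ha]; exact Bool.false_ne_true)
  · rw [Bool.not_eq_true] at ha hb
    rw [if_neg (by rw [ha]; exact Bool.false_ne_true), if_neg (by rw [hb]; exact Bool.false_ne_true),
        ha, hb]
    simp only [Bool.false_and, Bool.false_eq_true, false_or]

-- characterization of A's inner loop on an already-clean rem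
theorem pvInnerGo_spec (t u : List String) (hu : ∀ s ∈ u, pvClean s = s) :
    ∀ i, pvInnerGo t u i
      = decide (∀ j, i ≤ j → j < t.length → pvNorm (t.getD j "") = pvNorm (u.getD j "")) := by
  have hmap : u.map pvClean = u := by
    conv_rhs => rw [← List.map_id u]
    exact List.map_congr_left hu
  have key : ∀ k i, t.length - i ≤ k → pvInnerGo t u i
      = decide (∀ j, i ≤ j → j < t.length → pvNorm (t.getD j "") = pvNorm (u.getD j "")) := by
    intro k
    induction k with
    | zero =>
        intro i hk
        rw [pvInnerGo, dif_neg (by omega)]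
        exact (decide_eq_true (by intro j hij hj; omega)).symm
    | succ k ih =>
        intro i hk
        rw [pvInnerGo]
        by_cases h : i < t.length
        · rw [dif_pos h]
          simp only [hmap]
          by_cases hw : (pvStarts (t.getD i "") && pvStarts (u.getD i "")) = true
          · rw [if_pos hw, ih (i + 1) (by omega), decide_eq_decide]
            have hmatch : pvNorm (t.getD i "") = pvNorm (u.getD i "") :=
              (pvNorm_eq_iff _ _).mpr (Or.inl (by rw [← pvStarts_eq, ← pvStarts_eq]; exact hw))
            constructor
            · intro hp j hij hj
              rcases Nat.eq_or_lt_of_le hij with rfl | hlt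
              · exact hmatch
              · exact hp j hlt hj
            · intro hp j hij hj
              exact hp j (by omega) hj
          · rw [if_neg hw]
            by_cases hne : t.getD i "" ≠ u.getD i ""
            · rw [if_pos hne]
              symm
              apply decide_eq_false
              intro hP
              rcases (pvNorm_eq_iff _ _).mp (hP i le_rfl h) with hcase | hcase
              · exact hw (by rw [pvStarts_eq, pvStarts_eq]; exact hcase)
              · exact hne hcase
            · rw [if_neg hne]
              rw [Classical.not_not] at hne
              rw [ih (i + 1) (by omega), decide_eq_decide]
              have hmatch : pvNorm (t.getD i "") = pvNorm (u.getD i "") := by rw [hne]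
              constructor
              · intro hp j hij hj
                rcases Nat.eq_or_lt_of_le hij with rfl | hlt
                · exact hmatch
                · exact hp j hlt hj
              · intro hp j hij hj
                exact hp j (by omega) hj
        · rw [dif_neg h]
          exact (decide_eq_true (by intro j hij hj; omega)).symm
  intro i
  exact key t.length i (by omega)

-- the first iteration already replaces rem by its cleaned copy, and cleaning is idempotent
theorem pvInnerGo_clean (t r : List String) : pvInnerGo t r 0 = pvInnerGo t (r.map pvClean) 0 := by
  have hmm : (r.map pvClean).map pvClean = r.map pvClean := by
    rw [List.map_map]
    exact List.map_congr_left (fun s _ => pvClean_idem s)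
  rw [pvInnerGo, pvInnerGo]
  by_cases h : 0 < t.length
  · rw [dif_pos h, dif_pos h]
    simp only [hmm]
  · rw [dif_neg h, dif_neg h]

-- membership after the inner fold over the set of lengths
theorem pv_mem_inner_fold {β α : Type} [BEq α] [LawfulBEq α] (l : List β) (c : β → Prop)
    [DecidablePred c] (g : β → α) :
    ∀ (s : PySem.Set α) (x : α),
      (x ∈ l.foldl (fun s b => if c b then PySem.Set.add s (g b) else s) s)
        ↔ (x ∈ s ∨ ∃ b ∈ l, c b ∧ x = g b) := by
  induction l with
  | nil => intro s x; simp
  | cons b rest ih =>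
      intro s x
      rw [List.foldl_cons]
      by_cases hb : c b
      · rw [if_pos hb, ih, PySem.Set.mem_add]
        constructor
        · rintro ((h | h) | ⟨y, hy, h1, h2⟩)
          · exact Or.inl h
          · exact Or.inr ⟨b, List.mem_cons_self, hb, h⟩
          · exact Or.inr ⟨y, List.mem_cons_of_mem _ hy, h1, h2⟩
        · rintro (h | ⟨y, hy, h1, h2⟩)
          · exact Or.inl (Or.inl h)
          · rcases List.mem_cons.mp hy with rfl | hy'
            · exact Or.inl (Or.inr h2)
            · exact Or.inr ⟨y, hy', h1, h2⟩
      · rw [if_neg hb, ih]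
        constructor
        · rintro (h | ⟨y, hy, h1, h2⟩)
          · exact Or.inl h
          · exact Or.inr ⟨y, List.mem_cons_of_mem _ hy, h1, h2⟩
        · rintro (h | ⟨y, hy, h1, h2⟩)
          · exact Or.inl h
          · rcases List.mem_cons.mp hy with rfl | hy'
            · exact absurd h1 hb
            · exact Or.inr ⟨y, hy', h1, h2⟩

-- membership in B's precomputed prefix set
theorem pv_mem_prefixes (lengths : List Nat) (x : List String) :
    ∀ (all_triples : List (List String)),
      x ∈ pvPrefixes all_triples lengths
        ↔ ∃ r ∈ all_triples, ∃ L ∈ lengths,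
            L ≤ (pvCleaned r).length ∧ x = (pvCleaned r).take L := by
  have aux : ∀ (all_triples : List (List String)) (s0 : PySem.Set (List String)),
      x ∈ all_triples.foldl
            (fun px rem =>
              let cleaned := pvCleaned rem
              lengths.foldl
                (fun px L => if L ≤ cleaned.length then PySem.Set.add px (cleaned.take L) else px)
                px)
            s0
        ↔ x ∈ s0 ∨ ∃ r ∈ all_triples, ∃ L ∈ lengths,
            L ≤ (pvCleaned r).length ∧ x = (pvCleaned r).take L := by
    intro all_triples
    induction all_triples with
    | nil => intro s0; simp
    | cons r rest ih =>
        intro s0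
        rw [List.foldl_cons, ih]
        have hinner := pv_mem_inner_fold lengths (fun L => L ≤ (pvCleaned r).length)
          (fun L => (pvCleaned r).take L) s0 x
        simp only at hinner ⊢
        rw [hinner]
        constructor
        · rintro ((h | ⟨L, hL, h1, h2⟩) | ⟨y, hy, hrest⟩)
          · exact Or.inl h
          · exact Or.inr ⟨r, List.mem_cons_self, L, hL, h1, h2⟩
          · exact Or.inr ⟨y, List.mem_cons_of_mem _ hy, hrest⟩
        · rintro (h | ⟨y, hy, hrest⟩)
          · exact Or.inl (Or.inl h)
          · rcases List.mem_cons.mp hy with rfl | hy'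
            · exact Or.inl (Or.inr hrest)
            · exact Or.inr ⟨y, hy', hrest⟩
  intro all_triples
  rw [pvPrefixes, aux]
  simp [PySem.Set.empty]

-- the ∀-positions formulation equals the take-prefix formulation (under safety of the pair)
theorem pv_take_iff (t r : List String) (hsafe : pvSafe t r) :
    (∀ j, 0 ≤ j → j < t.length → pvNorm (t.getD j "") = pvNorm ((r.map pvClean).getD j ""))
      ↔ pvPrefixEq t r := by
  unfold pvPrefixEq
  have hcl : (pvCleaned r).length = r.length := by simp [pvCleaned]
  by_cases hlen : t.length ≤ r.length
  case neg =>
    have hrt : r.length < t.length := by omega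
    constructor
    · intro hp
      exfalso
      have := (hsafe r.length hrt (fun j hj => hp j (Nat.zero_le j) (by omega))).2.1
      omega
    · intro heq
      exfalso
      have h1 : (t.map pvNorm).length = ((pvCleaned r).take t.length).length := by rw [heq]
      simp [pvCleaned] at h1
      omega
  constructor
  · intro hp
    apply List.ext_getElem
    · simp [pvCleaned]
      omega
    · intro j hj1 hj2
      have hjt : j < t.length := by simpa using hj1
      have hjr : j < r.length := by omega
      have := hp j (Nat.zero_le j) hjt
      rw [List.getD_eq_getElem t "" hjt, List.getD_eq_getElem _ "" (by simpa using hjr)] at this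
      simp only [List.getElem_map] at this
      simp only [List.getElem_map, List.getElem_take, pvCleaned]
      exact this
  · intro heq j _ hjt
    have hjr : j < r.length := by omega
    have h1 : j < (t.map pvNorm).length := by simpa using hjt
    have h2 : j < ((pvCleaned r).take t.length).length := by
      simp [pvCleaned]
      omega
    have := List.getElem_of_eq heq h1
    rw [List.getD_eq_getElem t "" hjt, List.getD_eq_getElem _ "" (by simpa using hjr)]
    simp only [List.getElem_map, List.getElem_take, pvCleaned] at this
    simp only [List.getElem_map]
    rw [this]

-- under safety of the pair, A's inner loop decides the prefix relation
theorem pv_innerGo_prefix (t r : List String) (hs : pvSafe t r) :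
    pvInnerGo t r 0 = decide (pvPrefixEq t r) := by
  have hu : ∀ s ∈ r.map pvClean, pvClean s = s := by
    intro s hsm
    rcases List.mem_map.mp hsm with ⟨e, _, rfl⟩
    exact pvClean_idem e
  rw [pvInnerGo_clean, pvInnerGo_spec t (r.map pvClean) hu 0, decide_eq_decide]
  constructor
  · intro hp
    exact (pv_take_iff t r hs).mp (fun j _ hj => hp j (Nat.zero_le j) hj)
  · intro hp j _ hj
    exact (pv_take_iff t r hs).mpr hp j (Nat.zero_le j) hj

-- A's ordered scan with break, under the per-triple safety chain, decides existence of a match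
theorem pv_scan (t : List String) :
    ∀ (all : List (List String)),
      (∀ k, k < all.length →
        (∀ j, j < k → pvSafe t (all.getD j []) ∧ ¬ pvPrefixEq t (all.getD j [])) →
        pvSafe t (all.getD k [])) →
      pvAnyRem all t = decide (∃ r ∈ all, pvPrefixEq t r) := by
  intro all
  induction all with
  | nil => intro _; simp [pvAnyRem]
  | cons r rest ih =>
      intro h
      have hs : pvSafe t r := by
        have := h 0 (by simp) (by intro j hj; omega)
        simpa using this
      rw [pvAnyRem, pv_innerGo_prefix t r hs]
      by_cases hpe : pvPrefixEq t r
      · rw [if_pos (decide_eq_true hpe)]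
        exact (decide_eq_true ⟨r, List.mem_cons_self, hpe⟩).symm
      · rw [if_neg (by simp [hpe])]
        rw [ih (by
          intro k hk hchain
          have := h (k + 1) (by simpa using Nat.succ_lt_succ hk) (by
            intro j hj
            cases j with
            | zero => simpa using ⟨hs, hpe⟩
            | succ j' =>
                have := hchain j' (by omega)
                simpa using this)
          simpa using this)]
        rw [decide_eq_decide]
        constructor
        · rintro ⟨r', hr', hp⟩
          exact ⟨r', List.mem_cons_of_mem _ hr', hp⟩
        · rintro ⟨r', hr', hp⟩
          rcases List.mem_cons.mp hr' with rfl | hr''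
          · exact absurd hp hpe
          · exact ⟨r', hr'', hp⟩

-- B's set lookup decides the same existence, whenever t's length occurs among the lengths
theorem pv_contains (all_triples smaller : List (List String)) (t : List String)
    (hmem : t.length ∈ smaller.map List.length) :
    PySem.Set.contains
        (pvPrefixes all_triples (PySem.Set.ofList (smaller.map List.length)))
        (t.map pvNorm)
      = decide (∃ r ∈ all_triples, pvPrefixEq t r) := by
  rw [show PySem.Set.contains (pvPrefixes all_triples (PySem.Set.ofList (smaller.map List.length)))
        (t.map pvNorm)
      = decide (t.map pvNorm ∈ pvPrefixes all_triples
          (PySem.Set.ofList (smaller.map List.length))) from by simp [PySem.Set.contains],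
      decide_eq_decide]
  have hsetmem : ∀ L, L ∈ (PySem.Set.ofList (smaller.map List.length) : PySem.Set Nat)
      ↔ L ∈ smaller.map List.length := fun L => PySem.Set.mem_ofList _ L
  rw [pv_mem_prefixes]
  constructor
  · rintro ⟨r, hr, L, _hL, hLle, hx⟩
    have hLt : L = t.length := by
      have : (t.map pvNorm).length = ((pvCleaned r).take L).length := by rw [hx]
      simp only [List.length_map, List.length_take] at this
      omega
    subst hLt
    exact ⟨r, hr, hx⟩
  · rintro ⟨r, hr, hp⟩
    have hlen : t.length ≤ (pvCleaned r).length := by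
      have h1 : (t.map pvNorm).length = ((pvCleaned r).take t.length).length := by
        rw [pvPrefixEq] at hp
        rw [hp]
      simp only [List.length_map, List.length_take] at h1 ⊢
      omega
    exact ⟨r, hr, t.length, (hsetmem t.length).mpr hmem, hlen, hp⟩

theorem query_overlap_unfold (all_triples : List (List String)) (smaller : List (List String)) :
    query_overlap all_triples smaller = smaller.all (fun t => pvAnyRem all_triples t) := by
  unfold query_overlap
  rw [PySem.List.foldl_append_singleton_eq_map]
  simp [List.all_map]

-- ===== VERDICT (by name: the statement is the Claim_ definition above) =====
theorem query_overlap_spec : Claim_equal_query_overlap := by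
  unfold Claim_equal_query_overlap
  intro all_triples smaller _hdom hpre
  unfold Spec_query_overlap
  rw [query_overlap_unfold]
  show _ = (smaller.all fun t =>
    PySem.Set.contains (pvPrefixes all_triples (PySem.Set.ofList (smaller.map List.length)))
      (t.map pvNorm))
  rw [Bool.eq_iff_iff, List.all_eq_true, List.all_eq_true]
  constructor
  · intro H t ht
    rw [pv_contains all_triples smaller t (List.mem_map.mpr ⟨t, ht, rfl⟩),
        ← pv_scan t all_triples (hpre t ht)]
    exact H t ht
  · intro H t ht
    rw [pv_scan t all_triples (hpre t ht),
        ← pv_contains all_triples smaller t (List.mem_map.mpr ⟨t, ht, rfl⟩)]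
    exact H t ht
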